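-- pv_equiv track=rewrite | github.com/gabisbraz/compilador | main.py | gera_matriz
-- ===== SOURCE A (Python) =====
-- def gera_matriz(resultado: list):
--     resultado_matriz = []
--     linha_atual = []
--     for token in resultado:
--         if token == "\n":
--             if linha_atual:
--                 resultado_matriz.append(linha_atual)
--                 linha_atual = []
--         else:
--             linha_atual.append(token)
--     if linha_atual:
--         resultado_matriz.append(linha_atual)
--     return resultado_matriz
-- ===== SOURCE B (Python) =====
-- def gera_matriz(resultado: list):
--     out = []
--     i, n = 0, len(resultado)
--     while i < n:
--         if resultado[i] == "\n":
--             i += 1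
--             continue
--         j = i
--         while j < n and resultado[j] != "\n":
--             j += 1
--         out.append(resultado[i:j])
--         i = j
--     return out
-- ===== Notes on version B (the rewrite author's own statement) =====
-- stated objective: alternative
-- what changed: Replaces A's single pass with a mutable current-row accumulator and end-of-loop flush by a two-pointer span scan: skip a newline, otherwise find the end of the maximal newline-free run and slice it out as a whole row, so no pending row or final flush exists.
import Mathlib
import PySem

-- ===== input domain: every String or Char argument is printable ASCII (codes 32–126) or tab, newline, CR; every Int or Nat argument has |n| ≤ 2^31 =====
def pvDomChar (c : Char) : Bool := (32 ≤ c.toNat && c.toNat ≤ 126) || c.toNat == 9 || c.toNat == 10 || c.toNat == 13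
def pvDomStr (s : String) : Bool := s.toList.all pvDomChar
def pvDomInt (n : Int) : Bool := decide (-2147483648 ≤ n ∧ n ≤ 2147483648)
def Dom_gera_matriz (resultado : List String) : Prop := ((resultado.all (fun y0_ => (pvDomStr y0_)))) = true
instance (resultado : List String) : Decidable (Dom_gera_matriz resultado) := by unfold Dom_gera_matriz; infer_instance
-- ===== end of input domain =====

-- B replaces A's pending-row accumulator and final flush by a two-pointer span scan (alternative decomposition, same cost).

-- ===== PORT A =====
-- literal port of A: the loop body as a step over the state (resultado_matriz, linha_atual)
def gera_matriz_step (st : List (List String) × List String) (token : String) :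
    List (List String) × List String :=
  if token = "\n" then
    if st.2 ≠ [] then (st.1 ++ [st.2], []) else st
  else (st.1, st.2 ++ [token])

def gera_matriz (resultado : List String) : List (List String) :=
  let s := resultado.foldl gera_matriz_step ([], [])
  if s.2 ≠ [] then s.1 ++ [s.2] else s.1

-- ===== PORT B =====
-- port of Source B's two-pointer scan: the outer while advances past a newline or consumes a
-- maximal newline-free span (the inner 'while j' = takeWhile, 'i = j' = dropWhile)
def gera_matriz_alt : List String → List (List String)
  | [] => []
  | t :: rest =>
    if t = "\n" then gera_matriz_alt rest
    else (t :: rest.takeWhile (fun x => x ≠ "\n")) ::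
         gera_matriz_alt (rest.dropWhile (fun x => x ≠ "\n"))
  termination_by l => l.length
  decreasing_by
    · simp
    · have := List.length_dropWhile_le (fun x => !decide (x = "\n")) rest
      simp; omega

-- ===== PRECONDITION & SPEC =====
def Spec_gera_matriz (resultado : List String) (out : List (List String)) : Prop := out = gera_matriz_alt resultado
instance (resultado : List String) (out : List (List String)) : Decidable (Spec_gera_matriz resultado out) := by unfold Spec_gera_matriz; infer_instance

-- ===== CLAIM (what is proved, stated in full; the proofs are below) =====
def Claim_equal_gera_matriz : Prop := ∀ (resultado : List String), Dom_gera_matriz resultado → Spec_gera_matriz resultado (gera_matriz resultado)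

-- ===== LEMMAS AND PROOFS =====

-- loop invariant for A's fold: after the final flush, the result is the already emitted
-- rows, then the pending row merged with the next newline-free span, then B on the rest
theorem gera_matriz_fold_inv (l : List String) :
    ∀ (m : List (List String)) (lin : List String),
    (let s := l.foldl gera_matriz_step (m, lin)
     if s.2 ≠ [] then s.1 ++ [s.2] else s.1)
    = m ++ (if lin = [] then gera_matriz_alt l
            else (lin ++ l.takeWhile (fun x => x ≠ "\n")) ::
                 gera_matriz_alt (l.dropWhile (fun x => x ≠ "\n"))) := by
  induction l with
  | nil =>
      intro m lin
      by_cases h : lin = [] <;> simp [h, gera_matriz_alt]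
  | cons t r ih =>
      intro m lin
      rw [List.foldl_cons]
      by_cases ht : t = "\n"
      · by_cases hl : lin = []
        · rw [show gera_matriz_step (m, lin) t = (m, lin) by simp [gera_matriz_step, ht, hl]]
          rw [ih m lin]
          simp [hl, gera_matriz_alt, ht]
        · rw [show gera_matriz_step (m, lin) t = (m ++ [lin], []) by
            simp [gera_matriz_step, ht, hl]]
          rw [ih (m ++ [lin]) []]
          simp [hl, gera_matriz_alt, ht, List.takeWhile, List.dropWhile]
      · rw [show gera_matriz_step (m, lin) t = (m, lin ++ [t]) by simp [gera_matriz_step, ht]]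
        rw [ih m (lin ++ [t])]
        by_cases hl : lin = [] <;>
          simp [hl, gera_matriz_alt, ht, List.takeWhile, List.dropWhile]

-- ===== VERDICT (by name: the statement is the Claim_ definition above) =====
theorem gera_matriz_spec : Claim_equal_gera_matriz := by
  intro resultado _
  unfold Spec_gera_matriz gera_matriz
  have h := gera_matriz_fold_inv resultado [] []
  simpa using h
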